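-- pv_equiv track=rewrite | github.com/ark231/mulan_convert_calender | convert_calender.py | mucal_to_JDN
-- ===== SOURCE A (Python) =====
-- MUCAL_ORIGIN = 2459553
--
-- def is_leap_year(mu_year):
--     return (mu_year % 4 == 0 and mu_year % 100 != 100) or mu_year % 400 == 0
--
-- def is_leap_month(mu_month, is_leap_year):
--     """
--     leap 11 31
--      0   0   1
--      0   1   0
--      1   0   1
--      1   1   1
--
--     leap or not 11
--     """
--     return mu_month % 2 == 1 and (is_leap_year or mu_month != 11)
--
-- def length_of_year(mu_year):
--     return 366 if is_leap_year(mu_year) else 365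
--
-- def length_of_month(mu_month, is_leap_year):
--     return 31 if is_leap_month(mu_month, is_leap_year) else 30
--
-- def month_and_day_to_day_in_year(mu_month: int, mu_day: int, is_leap_year: bool) -> int:
--     result = 0
--     for m in range(mu_month):
--         result += length_of_month(m, is_leap_year)
--     result += mu_day
--     return result
--
-- def mucal_to_JDN(mu_year: int, mu_month: int, mu_day: int) -> int:
--     JDN = MUCAL_ORIGIN
--     if mu_year >= 0:
--         for y in range(mu_year):
--             JDN += length_of_year(y)
--         JDN += month_and_day_to_day_in_year(mu_month, mu_day, is_leap_year(mu_year))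
--     else:
--         for y in range(mu_year + 1, 0):
--             JDN -= length_of_year(y)
--         JDN -= length_of_year(mu_year) - month_and_day_to_day_in_year(mu_month, mu_day, is_leap_year(mu_year))
--     return JDN
-- ===== SOURCE B (Python) =====
-- MUCAL_ORIGIN = 2459553
--
-- def mucal_to_JDN(mu_year: int, mu_month: int, mu_day: int) -> int:
--     # Closed-form: leap years are exactly multiples of 4 (the %100 test in A is vacuous),
--     # so days before year 0..mu_year is 365*mu_year + ceil(mu_year/4); months alternate 31/30.
--     leap = mu_year % 4 == 0
--     days_in_months = 0
--     if mu_month > 0: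
--         days_in_months = 30 * mu_month + mu_month // 2
--         if not leap and mu_month >= 12:
--             days_in_months -= 1
--     return MUCAL_ORIGIN + 365 * mu_year - (-mu_year) // 4 + days_in_months + mu_day
-- ===== Notes on version B (the rewrite author's own statement) =====
-- stated objective: faster
-- what changed: Replaces A's per-year and per-month summation loops with a closed-form count of leap years (multiples of 4; A's %100/%400 tests are vacuous) and of 31-day months (odd months, minus the month-11 correction in non-leap years).
import Mathlib
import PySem

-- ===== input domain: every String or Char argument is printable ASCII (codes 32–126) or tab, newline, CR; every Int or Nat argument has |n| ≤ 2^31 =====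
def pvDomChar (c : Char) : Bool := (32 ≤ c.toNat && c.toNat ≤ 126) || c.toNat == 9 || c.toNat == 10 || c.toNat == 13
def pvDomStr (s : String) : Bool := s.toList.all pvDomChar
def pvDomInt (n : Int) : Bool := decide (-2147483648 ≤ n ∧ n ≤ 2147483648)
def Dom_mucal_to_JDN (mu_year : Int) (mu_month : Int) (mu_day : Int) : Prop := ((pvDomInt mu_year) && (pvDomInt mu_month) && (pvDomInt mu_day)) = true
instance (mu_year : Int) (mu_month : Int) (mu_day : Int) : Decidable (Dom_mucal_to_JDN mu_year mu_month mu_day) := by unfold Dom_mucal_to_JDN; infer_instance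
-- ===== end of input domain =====

-- B replaces A's per-year and per-month summation loops with a closed-form count
-- of leap years (multiples of 4) and leap months (odd months); objective: faster (O(1) vs O(|year|+|month|)).

-- ===== PORT A =====
def MUCAL_ORIGIN : Int := 2459553

def is_leap_year (mu_year : Int) : Bool :=
  (PySem.Int.mod mu_year 4 == 0 && !(PySem.Int.mod mu_year 100 == 100)) || PySem.Int.mod mu_year 400 == 0

def is_leap_month (mu_month : Int) (is_leap_year : Bool) : Bool :=
  PySem.Int.mod mu_month 2 == 1 && (is_leap_year || !(mu_month == 11))

def length_of_year (mu_year : Int) : Int :=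
  if is_leap_year mu_year then 366 else 365

def length_of_month (mu_month : Int) (is_leap_year : Bool) : Int :=
  if is_leap_month mu_month is_leap_year then 31 else 30

def month_and_day_to_day_in_year (mu_month : Int) (mu_day : Int) (leap : Bool) : Int :=
  ((PySem.List.pyRange 0 mu_month 1).foldl (fun result m => result + length_of_month m leap) 0) + mu_day

def mucal_to_JDN (mu_year : Int) (mu_month : Int) (mu_day : Int) : Int :=
  if mu_year ≥ 0 then
    ((PySem.List.pyRange 0 mu_year 1).foldl (fun JDN y => JDN + length_of_year y) MUCAL_ORIGIN)
      + month_and_day_to_day_in_year mu_month mu_day (is_leap_year mu_year)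
  else
    ((PySem.List.pyRange (mu_year + 1) 0 1).foldl (fun JDN y => JDN - length_of_year y) MUCAL_ORIGIN)
      - (length_of_year mu_year - month_and_day_to_day_in_year mu_month mu_day (is_leap_year mu_year))

-- ===== PORT B =====
def mucal_to_JDN_alt (mu_year : Int) (mu_month : Int) (mu_day : Int) : Int :=
  let leap := PySem.Int.mod mu_year 4 == 0
  let days_in_months : Int :=
    if mu_month > 0 then
      let base := 30 * mu_month + PySem.Int.floordiv mu_month 2
      if !leap && mu_month ≥ 12 then base - 1 else base
    else 0
  2459553 + 365 * mu_year - PySem.Int.floordiv (-mu_year) 4 + days_in_months + mu_day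

-- ===== PRECONDITION & SPEC =====
def Spec_mucal_to_JDN (mu_year : Int) (mu_month : Int) (mu_day : Int) (out : Int) : Prop := out = mucal_to_JDN_alt mu_year mu_month mu_day
instance (mu_year : Int) (mu_month : Int) (mu_day : Int) (out : Int) : Decidable (Spec_mucal_to_JDN mu_year mu_month mu_day out) := by unfold Spec_mucal_to_JDN; infer_instance

-- ===== CLAIM (what is proved, stated in full; the proofs are below) =====
def Claim_equal_mucal_to_JDN : Prop := ∀ (mu_year : Int) (mu_month : Int) (mu_day : Int), Dom_mucal_to_JDN mu_year mu_month mu_day → Spec_mucal_to_JDN mu_year mu_month mu_day (mucal_to_JDN mu_year mu_month mu_day)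

-- ===== LEMMAS AND PROOFS =====

-- A's %100/%400 tests are vacuous/redundant: leap ⇔ divisible by 4.
lemma leap_iff (y : Int) : is_leap_year y = (PySem.Int.mod y 4 == 0) := by
  unfold is_leap_year
  have h100 : (PySem.Int.mod y 100 == 100) = false := by
    have := PySem.Int.mod_lt y (b := 100) (by norm_num)
    simp; omega
  by_cases h4 : PySem.Int.mod y 4 = 0
  · have t4 : (PySem.Int.mod y 4 == 0) = true := by
      simp
      exact (PySem.Int.mod_eq_zero_iff_dvd y 4).1 h4
    rw [t4, h100]; simp
  · have t4 : (PySem.Int.mod y 4 == 0) = false := by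
      simp
      exact fun hd => h4 ((PySem.Int.mod_eq_zero_iff_dvd y 4).2 hd)
    have h400 : (PySem.Int.mod y 400 == 0) = false := by
      simp
      exact fun hd => h4 ((PySem.Int.mod_eq_zero_iff_dvd y 4).2
        (dvd_trans (by norm_num : (4:Int) ∣ 400) hd))
    rw [t4, h400]; simp

lemma leap_natCast (N : Nat) : is_leap_year ((N : Nat) : Int) = decide (N % 4 = 0) := by
  rw [leap_iff]
  by_cases h : N % 4 = 0 <;> simp [h] <;> omega

lemma leap_neg_natCast (N : Nat) : is_leap_year (-((N : Nat) : Int)) = decide (N % 4 = 0) := by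
  rw [leap_iff]
  by_cases h : N % 4 = 0 <;> simp [h] <;> omega

lemma bflag_natCast (N : Nat) :
    (PySem.Int.mod ((N : Nat) : Int) 4 == 0) = decide (N % 4 = 0) := by
  have h := leap_natCast N
  rw [leap_iff] at h
  exact h

lemma bflag_neg_natCast (N : Nat) :
    (PySem.Int.mod (-((N : Nat) : Int)) 4 == 0) = decide (N % 4 = 0) := by
  have h := leap_neg_natCast N
  rw [leap_iff] at h
  exact h

lemma loy_val (N : Nat) : length_of_year ((N : Nat) : Int) = 365 + (if N % 4 = 0 then 1 else 0) := by
  unfold length_of_year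
  rw [leap_natCast]
  by_cases h : N % 4 = 0 <;> simp [h]

lemma loy_neg_val (N : Nat) : length_of_year (-((N : Nat) : Int)) = 365 + (if N % 4 = 0 then 1 else 0) := by
  unfold length_of_year
  rw [leap_neg_natCast]
  by_cases h : N % 4 = 0 <;> simp [h]

lemma lom_val (n : Nat) (leap : Bool) :
    length_of_month ((n : Nat) : Int) leap = 30 + (if n % 2 = 1 ∧ (leap = true ∨ n ≠ 11) then 1 else 0) := by
  unfold length_of_month is_leap_month
  rw [show PySem.Int.mod ((n : Nat) : Int) 2 = ((n % 2 : Nat) : Int) from PySem.Int.mod_natCast n 2]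
  by_cases h2 : n % 2 = 1 <;> by_cases h11 : n = 11 <;> rcases leap with _ | _ <;>
    simp_all <;> omega

lemma monthsum (leap : Bool) (M : Nat) (c : Int) :
    (PySem.List.pyRange 0 ((M : Nat) : Int) 1).foldl (fun r m => r + length_of_month m leap) c
      = c + 30 * M + ((M / 2 : Nat) : Int) - (if leap = false ∧ 12 ≤ M then 1 else 0) := by
  induction M generalizing c with
  | zero => simp [PySem.List.pyRange_one_eq_nil (by norm_num : (0:Int) ≤ 0)]
  | succ n ih =>
    rw [show (((n+1 : Nat)) : Int) = ((n : Nat) : Int) + 1 by push_cast; ring,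
        PySem.List.pyRange_one_succ_right (by positivity), List.foldl_append, ih]
    simp only [List.foldl_cons, List.foldl_nil, lom_val]
    rcases leap with _ | _ <;>
      simp only [Bool.false_eq_true, Bool.true_eq_false, eq_self_iff_true, true_or, false_or,
        false_and, and_true, true_and, if_true, if_false, not_false_eq_true] <;>
      split_ifs <;> omega

lemma yearsum_pos (N : Nat) (c : Int) :
    (PySem.List.pyRange 0 ((N : Nat) : Int) 1).foldl (fun j y => j + length_of_year y) c
      = c + 365 * N + (((N + 3) / 4 : Nat) : Int) := by
  induction N generalizing c with
  | zero => simp [PySem.List.pyRange_one_eq_nil (by norm_num : (0:Int) ≤ 0)]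
  | succ n ih =>
    rw [show (((n+1 : Nat)) : Int) = ((n : Nat) : Int) + 1 by push_cast; ring,
        PySem.List.pyRange_one_succ_right (by positivity), List.foldl_append, ih]
    simp only [List.foldl_cons, List.foldl_nil, loy_val]
    split_ifs <;> omega

lemma yearsum_neg (N : Nat) (c : Int) :
    (PySem.List.pyRange (-((N : Nat) : Int)) 0 1).foldl (fun j y => j - length_of_year y) c
      = c - 365 * N - ((N / 4 : Nat) : Int) := by
  induction N generalizing c with
  | zero => simp [PySem.List.pyRange_one_eq_nil (by norm_num : (0:Int) ≤ -((0:Nat):Int))]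
  | succ n ih =>
    rw [PySem.List.pyRange_one_cons (by push_cast; omega : -(((n+1 : Nat)) : Int) < 0)]
    simp only [List.foldl_cons]
    rw [show -(((n+1 : Nat)) : Int) + 1 = -((n : Nat) : Int) by push_cast; ring, ih]
    have := loy_neg_val (n+1)
    split_ifs at this <;> rw [this] <;> omega

lemma ceil_div4 (N : Nat) : PySem.Int.floordiv (-((N : Nat) : Int)) 4 = -(((N + 3) / 4 : Nat) : Int) := by
  have h : -(PySem.Int.floordiv (-((N : Nat) : Int)) 4) = (((N + 3) / 4 : Nat) : Int) := by
    rw [PySem.Int.neg_floordiv_neg_eq_iff_of_pos (by norm_num)]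
    constructor <;> omega
  omega

theorem mucal_to_JDN_spec_aux (mu_year mu_month mu_day : Int) :
    mucal_to_JDN mu_year mu_month mu_day = mucal_to_JDN_alt mu_year mu_month mu_day := by
  unfold mucal_to_JDN mucal_to_JDN_alt MUCAL_ORIGIN month_and_day_to_day_in_year
  by_cases hy : mu_year ≥ 0
  · obtain ⟨N, rfl⟩ : ∃ N : Nat, mu_year = ((N : Nat) : Int) :=
      ⟨mu_year.toNat, (Int.toNat_of_nonneg hy).symm⟩
    rw [if_pos hy, yearsum_pos, leap_natCast, bflag_natCast, ceil_div4]
    have hdec : decide (N % 4 = 0) = true ∨ decide (N % 4 = 0) = false := by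
      by_cases h : N % 4 = 0
      · exact Or.inl (decide_eq_true h)
      · exact Or.inr (decide_eq_false h)
    by_cases hm : mu_month > 0
    · obtain ⟨M, rfl⟩ : ∃ M : Nat, mu_month = ((M : Nat) : Int) :=
        ⟨mu_month.toNat, (Int.toNat_of_nonneg (by omega)).symm⟩
      rw [monthsum]
      have hfd : PySem.Int.floordiv ((M : Nat) : Int) 2 = ((M / 2 : Nat) : Int) := by
        exact_mod_cast PySem.Int.floordiv_natCast M 2
      simp only [if_pos hm, hfd]
      rcases hdec with h4 | h4 <;> rw [h4] <;>
        [have h4' := of_decide_eq_true h4; have h4' := of_decide_eq_false h4] <;>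
        simp only [Bool.not_true, Bool.not_false, Bool.false_and, Bool.true_and,
          Bool.and_eq_true, decide_eq_true_eq, Bool.false_eq_true, Bool.true_eq_false,
          false_and, true_and, if_true, if_false, ge_iff_le] <;>
        (try split_ifs) <;> omega
    · rw [PySem.List.pyRange_one_eq_nil (by omega : mu_month ≤ (0:Int))]
      simp only [List.foldl_nil, if_neg hm]
      ring
  · obtain ⟨N, hN⟩ : ∃ N : Nat, mu_year = -((N : Nat) : Int) :=
      ⟨(-mu_year).toNat, by omega⟩
    have hN1 : 1 ≤ N := by omega
    subst hN
    rw [if_neg hy]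
    rw [show -((N : Nat) : Int) + 1 = -(((N - 1 : Nat)) : Int) by push_cast; omega]
    have hfdN : PySem.Int.floordiv ((N : Nat) : Int) 4 = ((N / 4 : Nat) : Int) := by
      exact_mod_cast PySem.Int.floordiv_natCast N 4
    rw [yearsum_neg, leap_neg_natCast, bflag_neg_natCast, neg_neg, hfdN]
    have hloy := loy_neg_val N
    have hdec : decide (N % 4 = 0) = true ∨ decide (N % 4 = 0) = false := by
      by_cases h : N % 4 = 0
      · exact Or.inl (decide_eq_true h)
      · exact Or.inr (decide_eq_false h)
    by_cases hm : mu_month > 0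
    · obtain ⟨M, rfl⟩ : ∃ M : Nat, mu_month = ((M : Nat) : Int) :=
        ⟨mu_month.toNat, (Int.toNat_of_nonneg (by omega)).symm⟩
      rw [monthsum]
      have hfd : PySem.Int.floordiv ((M : Nat) : Int) 2 = ((M / 2 : Nat) : Int) := by
        exact_mod_cast PySem.Int.floordiv_natCast M 2
      simp only [if_pos hm, hfd]
      rcases hdec with h4 | h4 <;> rw [h4] <;>
        [have h4' := of_decide_eq_true h4; have h4' := of_decide_eq_false h4] <;>
        rw [hloy] <;>
        simp only [Bool.not_true, Bool.not_false, Bool.false_and, Bool.true_and,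
          Bool.and_eq_true, decide_eq_true_eq, Bool.false_eq_true, Bool.true_eq_false,
          false_and, true_and, if_true, if_false, ge_iff_le] <;>
        (try split_ifs) <;> omega
    · rw [PySem.List.pyRange_one_eq_nil (by omega : mu_month ≤ (0:Int))]
      simp only [List.foldl_nil, if_neg hm]
      rw [hloy]
      (try split_ifs) <;> omega

-- ===== VERDICT (by name: the statement is the Claim_ definition above) =====
theorem mucal_to_JDN_spec : Claim_equal_mucal_to_JDN := by
  intro mu_year mu_month mu_day _
  exact mucal_to_JDN_spec_aux mu_year mu_month mu_day
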